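-- pv_equiv track=rewrite | github.com/b0untyhunt3r/taktis | taktis/core/cron_scheduler.py | validate_cron_expr
-- ===== SOURCE A (Python) =====
-- def _cron_field_matches(field: str, value: int, lo: int, hi: int) -> bool:
--     """Check if ``value`` matches a single cron field bounded to [lo, hi].
--
--     Accepts ``*``, comma lists, ranges (``a-b``), and steps (``*/n`` or
--     ``a-b/n``). Returns False on any unparseable token so a malformed
--     expression simply never fires (caller validates upfront).
--     """
--     field = field.strip()
--     for token in field.split(","):
--         token = token.strip()
--         if not token:
--             continue
--         step = 1
--         if "/" in token:
--             base, _, step_s = token.partition("/")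
--             try:
--                 step = int(step_s)
--             except ValueError:
--                 return False
--             if step < 1:
--                 return False
--             token = base or "*"
--         if token == "*":
--             start, end = lo, hi
--         elif "-" in token:
--             a, _, b = token.partition("-")
--             try:
--                 start, end = int(a), int(b)
--             except ValueError:
--                 return False
--         else:
--             try:
--                 start = end = int(token)
--             except ValueError:
--                 return False
--         if start > end or end < lo or start > hi:
--             continue
--         if start <= value <= end and (value - start) % step == 0:
--             return True
--     return False
--
-- def validate_cron_expr(expr: str) -> str | None:
--     """Return None if ``expr`` is a syntactically usable 5-field cron, else
--     a short error message describing what's wrong."""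
--     if not expr or not expr.strip():
--         return "Cron expression is empty"
--     parts = expr.strip().split()
--     if len(parts) != 5:
--         return f"Cron expression must have 5 fields (got {len(parts)})"
--     bounds = [(0, 59), (0, 23), (1, 31), (1, 12), (0, 7)]
--     labels = ["minute", "hour", "day-of-month", "month", "day-of-week"]
--     # Reject if no value in the field matches any candidate value in [lo, hi].
--     for field, (lo, hi), label in zip(parts, bounds, labels):
--         if not any(_cron_field_matches(field, v, lo, hi) for v in range(lo, hi + 1)):
--             return f"Invalid {label} field: '{field}'"
--     return None
-- ===== SOURCE B (Python) =====
-- FIELDS = [(0, 59, "minute"), (0, 23, "hour"), (1, 31, "day-of-month"),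
--           (1, 12, "month"), (0, 7, "day-of-week")]
--
--
-- def _int_or_none(s):
--     try:
--         return int(s)
--     except ValueError:
--         return None
--
--
-- def _token_ok(token, lo, hi):
--     """Tri-valued verdict for one token: None = malformed (kills the whole
--     field), True = some value in [lo, hi] matches it, False = no value does.
--     Satisfiability is decided arithmetically: the first member of the step
--     progression at or above max(lo, start) is compared against min(hi, end) —
--     no scan over candidate values."""
--     step = 1
--     cut = token.find("/")
--     if cut >= 0:
--         step = _int_or_none(token[cut + 1:])
--         if step is None or step < 1:
--             return None
--         token = token[:cut] or "*"
--     if token == "*":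
--         start, end = lo, hi
--     else:
--         dash = token.find("-")
--         if dash >= 0:
--             start = _int_or_none(token[:dash])
--             end = _int_or_none(token[dash + 1:])
--         else:
--             start = end = _int_or_none(token)
--         if start is None or end is None:
--             return None
--     a = max(lo, start)
--     return a + (start - a) % step <= min(hi, end)
--
--
-- def validate_cron_expr(expr):
--     if not expr or not expr.strip():
--         return "Cron expression is empty"
--     parts = expr.strip().split()
--     if len(parts) != 5:
--         return f"Cron expression must have 5 fields (got {len(parts)})"
--     for (lo, hi, label), field in zip(FIELDS, parts):
--         sat = False
--         for token in field.strip().split(","):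
--             token = token.strip()
--             if not token:
--                 continue
--             verdict = _token_ok(token, lo, hi)
--             if verdict is None:
--                 sat = False
--                 break
--             if verdict:
--                 sat = True
--                 break
--         if not sat:
--             return f"Invalid {label} field: '{field}'"
--     return None
-- ===== Notes on version B (the rewrite author's own statement) =====
-- stated objective: alternative
-- what changed: A decides each field by testing every candidate value in range(lo, hi+1) against the whole field; B never enumerates values: a tri-valued per-token verdict (_token_ok, using str.find plus slicing instead of partition) decides satisfiability arithmetically by comparing the first member of the step progression at or above max(lo, start) against min(hi, end).
import Mathlib
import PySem

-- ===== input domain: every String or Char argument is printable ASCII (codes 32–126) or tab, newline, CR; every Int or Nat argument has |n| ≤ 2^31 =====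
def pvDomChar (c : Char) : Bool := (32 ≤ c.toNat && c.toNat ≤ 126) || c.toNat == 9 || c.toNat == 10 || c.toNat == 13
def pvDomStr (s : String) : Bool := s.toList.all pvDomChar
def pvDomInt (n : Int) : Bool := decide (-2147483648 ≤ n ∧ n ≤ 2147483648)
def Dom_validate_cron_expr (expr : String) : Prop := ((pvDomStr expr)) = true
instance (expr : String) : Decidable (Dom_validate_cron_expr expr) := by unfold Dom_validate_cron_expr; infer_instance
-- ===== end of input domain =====

-- B replaces A's scan over every candidate value in [lo, hi] by a tri-valued per-token verdict
-- (find/slice parsing, first progression member >= max(lo, start) vs min(hi, end)); objective: alternative.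


-- ===== PORT A =====
-- hand port of str.partition(sep): exact when sep occurs (A only uses it under an 'in' guard)
def pvPartition (sep : Char) : List Char → List Char × List Char
  | [] => ([], [])
  | c :: cs =>
    if c = sep then ([], cs)
    else
      let p := pvPartition sep cs
      (c :: p.1, p.2)

def pvBounds : List (Int × Int) := [(0, 59), (0, 23), (1, 31), (1, 12), (0, 7)]

def pvLabels : List (List Char) :=
  ["minute".toList, "hour".toList, "day-of-month".toList, "month".toList, "day-of-week".toList]

def pvInvalidMsg (label field : List Char) : String :=
  String.ofList ("Invalid ".toList ++ label ++ " field: '".toList ++ field ++ ['\''])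

-- the token loop of _cron_field_matches ('return False' = false, 'continue' = recurse)
def cronTokensMatch (value lo hi : Int) : List (List Char) → Bool
  | [] => false
  | t :: ts =>
    let token := PySem.Chars.strip t
    if token = [] then cronTokensMatch value lo hi ts
    else
      let parsed : Option (List Char × Int) :=
        if PySem.Chars.isIn ['/'] token then
          match PySem.Int.ofChars? (pvPartition '/' token).2 with
          | none => none
          | some step =>
            if step < 1 then none
            else some ((if (pvPartition '/' token).1 = [] then ['*'] else (pvPartition '/' token).1), step)
        else some (token, 1)
      match parsed with
      | none => false
      | some (token, step) =>
        let se : Option (Int × Int) :=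
          if token = ['*'] then some (lo, hi)
          else if PySem.Chars.isIn ['-'] token then
            match PySem.Int.ofChars? (pvPartition '-' token).1,
                  PySem.Int.ofChars? (pvPartition '-' token).2 with
            | some a, some b => some (a, b)
            | _, _ => none
          else
            match PySem.Int.ofChars? token with
            | some n => some (n, n)
            | none => none
        match se with
        | none => false
        | some (start, stop) =>
          if start > stop ∨ stop < lo ∨ start > hi then cronTokensMatch value lo hi ts
          else if start ≤ value ∧ value ≤ stop ∧ PySem.Int.mod (value - start) step = 0 then true
          else cronTokensMatch value lo hi ts

def cron_field_matches (field : List Char) (value lo hi : Int) : Bool :=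
  cronTokensMatch value lo hi (PySem.Chars.splitOn (PySem.Chars.strip field) [','])

def checkFieldsA : List (List Char × ((Int × Int) × List Char)) → Option String
  | [] => none
  | (field, ((lo, hi), label)) :: rest =>
    if (PySem.List.pyRange lo (hi + 1) 1).any (fun v => cron_field_matches field v lo hi) then
      checkFieldsA rest
    else some (pvInvalidMsg label field)

def validate_cron_expr (expr : String) : Option String :=
  let s := expr.toList
  if s = [] ∨ PySem.Chars.strip s = [] then some "Cron expression is empty"
  else
    let parts := PySem.Chars.split₀ (PySem.Chars.strip s)
    if parts.length ≠ 5 then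
      some (String.ofList ("Cron expression must have 5 fields (got ".toList ++
        PySem.Int.toChars (parts.length : Int) ++ [')']))
    else checkFieldsA (parts.zip (pvBounds.zip pvLabels))

-- ===== PORT B =====
-- FIELDS of Source B: one table of (lo, hi, label) triples
def cronFieldsB : List (Int × Int × List Char) :=
  [(0, 59, "minute".toList), (0, 23, "hour".toList), (1, 31, "day-of-month".toList),
   (1, 12, "month".toList), (0, 7, "day-of-week".toList)]

-- _int_or_none of Source B
def intOrNone (s : List Char) : Option Int := PySem.Int.ofChars? s

-- _token_ok of Source B: find/slice parsing, arithmetic satisfiability test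
def token_ok (tok : List Char) (lo hi : Int) : Option Bool :=
  let cut := PySem.Chars.find tok ['/']
  ((if 0 ≤ cut then
      (intOrNone (tok.drop (cut.toNat + 1))).bind fun step =>
        if step < 1 then none
        else some (if tok.take cut.toNat = [] then ['*'] else tok.take cut.toNat, step)
    else some (tok, 1)) : Option (List Char × Int)).bind fun p =>
    ((if p.1 = ['*'] then some (lo, hi)
      else
        let dash := PySem.Chars.find p.1 ['-']
        if 0 ≤ dash then
          (intOrNone (p.1.take dash.toNat)).bind fun a =>
            (intOrNone (p.1.drop (dash.toNat + 1))).map fun b2 => (a, b2)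
        else (intOrNone p.1).map fun n => (n, n)) : Option (Int × Int)).map fun q =>
      decide (max lo q.1 + PySem.Int.mod (q.1 - max lo q.1) p.2 ≤ min hi q.2)

-- the sat/break token loop of validate_cron_expr in Source B
def satTokensB (lo hi : Int) : List (List Char) → Bool
  | [] => false
  | t :: ts =>
    let token := PySem.Chars.strip t
    if token = [] then satTokensB lo hi ts
    else
      match token_ok token lo hi with
      | none => false
      | some true => true
      | some false => satTokensB lo hi ts

def checkFieldsB : List ((Int × Int × List Char) × List Char) → Option String
  | [] => none
  | ((lo, hi, label), field) :: rest =>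
    if satTokensB lo hi (PySem.Chars.splitOn (PySem.Chars.strip field) [',']) then
      checkFieldsB rest
    else some (String.ofList ("Invalid ".toList ++ label ++ " field: '".toList ++ field ++ ['\'']))

def validate_cron_expr_alt (expr : String) : Option String :=
  let s := expr.toList
  if s = [] ∨ PySem.Chars.strip s = [] then some "Cron expression is empty"
  else
    let parts := PySem.Chars.split₀ (PySem.Chars.strip s)
    if parts.length ≠ 5 then
      some (String.ofList ("Cron expression must have 5 fields (got ".toList ++
        PySem.Int.toChars (parts.length : Int) ++ [')']))
    else checkFieldsB (cronFieldsB.zip parts)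

-- ===== PRECONDITION & SPEC =====
def Spec_validate_cron_expr (expr : String) (out : Option String) : Prop := out = validate_cron_expr_alt expr
instance (expr : String) (out : Option String) : Decidable (Spec_validate_cron_expr expr out) := by unfold Spec_validate_cron_expr; infer_instance

-- ===== CLAIM (what is proved, stated in full; the proofs are below) =====
def Claim_equal_validate_cron_expr : Prop := ∀ (expr : String), Dom_validate_cron_expr expr → Spec_validate_cron_expr expr (validate_cron_expr expr)

-- ===== LEMMAS AND PROOFS =====

-- partition at the first occurrence of sep = slicing at its find index
theorem pvPartition_append (c : Char) (u v : List Char) (hc : c ∉ u) :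
    pvPartition c (u ++ c :: v) = (u, v) := by
  induction u with
  | nil => simp [pvPartition]
  | cons x xs ih =>
    have hx : x ≠ c := by rintro rfl; exact hc (List.mem_cons_self ..)
    simp only [List.cons_append, pvPartition, if_neg hx]
    rw [ih (fun h => hc (List.mem_cons_of_mem _ h))]

theorem find_single_pos (c : Char) (l : List Char) (h : 0 ≤ PySem.Chars.find l [c]) :
    (PySem.Chars.find l [c]).toNat < l.length ∧
    l[(PySem.Chars.find l [c]).toNat]? = some c ∧
    c ∉ l.take (PySem.Chars.find l [c]).toNat := by
  obtain ⟨hpre, hmin⟩ := PySem.Chars.find_spec (s := l) (sub := [c]) h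
  set k := (PySem.Chars.find l [c]).toNat with hk
  obtain ⟨r, hr⟩ := hpre
  have hklen : k < l.length := by
    by_contra hge
    have : l.drop k = [] := List.drop_eq_nil_of_le (by omega)
    rw [this] at hr; simp at hr
  refine ⟨hklen, ?_, ?_⟩
  · have : l.drop k = c :: r := by simpa using hr.symm
    have := congrArg (·[0]?) this
    simpa [List.getElem?_drop] using this
  · intro hmem
    obtain ⟨i, hi, hli⟩ := List.mem_take_iff_getElem.mp hmem
    have hik : i < k := by omega
    have hil : i < l.length := by omega
    apply hmin i hik
    refine ⟨l.drop (i + 1), ?_⟩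
    have := List.getElem_cons_drop hil
    simpa [hli] using this

theorem partition_eq_slices (c : Char) (l : List Char) (h : 0 ≤ PySem.Chars.find l [c]) :
    pvPartition c l = (l.take (PySem.Chars.find l [c]).toNat,
                       l.drop ((PySem.Chars.find l [c]).toNat + 1)) := by
  obtain ⟨hlen, hget, hnot⟩ := find_single_pos c l h
  set k := (PySem.Chars.find l [c]).toNat with hk
  have hdecomp : l = l.take k ++ c :: l.drop (k + 1) := by
    conv_lhs => rw [← List.take_append_drop k l]
    congr 1
    have := List.getElem_cons_drop hlen
    rw [← this]
    have : l[k] = c := by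
      have := hget; rw [List.getElem?_eq_getElem hlen] at this; simpa using this
    rw [this]
  conv_lhs => rw [hdecomp]
  exact pvPartition_append c _ _ hnot

theorem isIn_iff_find_nonneg (c : Char) (l : List Char) :
    PySem.Chars.isIn [c] l = true ↔ 0 ≤ PySem.Chars.find l [c] := by
  rw [PySem.Chars.isIn_iff_infix, ← PySem.Chars.find_nonneg_iff]

-- A's parse of one (stripped, nonempty) token, factored out for the proofs
def parseA (token : List Char) (lo hi : Int) : Option (Int × Int × Int) :=
  let st : Option (List Char × Int) :=
    if PySem.Chars.isIn ['/'] token then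
      match PySem.Int.ofChars? (pvPartition '/' token).2 with
      | none => none
      | some step =>
        if step < 1 then none
        else some ((if (pvPartition '/' token).1 = [] then ['*'] else (pvPartition '/' token).1), step)
    else some (token, 1)
  match st with
  | none => none
  | some (tok, step) =>
    if tok = ['*'] then some (lo, hi, step)
    else if PySem.Chars.isIn ['-'] tok then
      match PySem.Int.ofChars? (pvPartition '-' tok).1,
            PySem.Int.ofChars? (pvPartition '-' tok).2 with
      | some a, some b => some (a, b, step)
      | _, _ => none
    else
      match PySem.Int.ofChars? tok with
      | some n => some (n, n, step)
      | none => none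

theorem stStage (token tk : List Char) (stp : Int)
    (h : (if PySem.Chars.isIn ['/'] token = true then
        match PySem.Int.ofChars? (pvPartition '/' token).2 with
        | none => none
        | some step =>
          if step < 1 then none
          else some (if (pvPartition '/' token).1 = [] then ['*'] else (pvPartition '/' token).1, step)
      else some (token, 1)) = some (tk, stp)) : 1 ≤ stp := by
  split at h
  · split at h
    · simp at h
    · split at h
      · simp at h
      · simp at h; omega
  · simp at h; omega

theorem parseA_step_pos (token : List Char) (lo hi s e st : Int)
    (h : parseA token lo hi = some (s, e, st)) : 1 ≤ st := by
  unfold parseA at h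
  dsimp only at h
  split at h
  · simp at h
  · rename_i tk stp heq
    have h1 := stStage token tk stp heq
    repeat' split at h
    all_goals simp at h
    all_goals omega

theorem seTriple (tok : List Char) (lo hi step : Int) :
    (if tok = ['*'] then some (lo, hi, step)
     else if PySem.Chars.isIn ['-'] tok = true then
       match PySem.Int.ofChars? (pvPartition '-' tok).1, PySem.Int.ofChars? (pvPartition '-' tok).2 with
       | some a, some b => some (a, b, step)
       | _, _ => none
     else match PySem.Int.ofChars? tok with
       | some n => some (n, n, step)
       | none => none)
    = Option.map (fun p => (p.1, p.2, step))
      (if tok = ['*'] then some (lo, hi)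
       else if PySem.Chars.isIn ['-'] tok = true then
         match PySem.Int.ofChars? (pvPartition '-' tok).1, PySem.Int.ofChars? (pvPartition '-' tok).2 with
         | some a, some b => some (a, b)
         | _, _ => none
       else match PySem.Int.ofChars? tok with
         | some n => some (n, n)
         | none => none) := by
  repeat' split
  all_goals simp_all

theorem cronTokensMatch_cons (value lo hi : Int) (t : List Char) (ts : List (List Char)) :
    cronTokensMatch value lo hi (t :: ts) =
      (let token := PySem.Chars.strip t
       if token = [] then cronTokensMatch value lo hi ts
       else
         match parseA token lo hi with
         | none => false
         | some (start, stop, step) =>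
           if start > stop ∨ stop < lo ∨ start > hi then cronTokensMatch value lo hi ts
           else if start ≤ value ∧ value ≤ stop ∧ PySem.Int.mod (value - start) step = 0 then true
           else cronTokensMatch value lo hi ts) := by
  simp only [cronTokensMatch, parseA]
  by_cases h0 : PySem.Chars.strip t = []
  · simp [h0]
  · simp only [h0, if_false]
    split
    · rfl
    · rw [seTriple]
      split
      · rename_i heq
        rw [heq]
        rfl
      · rename_i a b heq
        rw [heq]
        rfl

-- B's token_ok computed from A's parse
theorem token_ok_eq_parseA (token : List Char) (lo hi : Int) :
    token_ok token lo hi = (parseA token lo hi).map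
      (fun r => decide (max lo r.1 + PySem.Int.mod (r.1 - max lo r.1) r.2.2 ≤ min hi r.2.1)) := by
  unfold token_ok parseA
  dsimp only
  by_cases hs : 0 ≤ PySem.Chars.find token ['/']
  · have hin : PySem.Chars.isIn ['/'] token = true := (isIn_iff_find_nonneg _ _).mpr hs
    rw [partition_eq_slices '/' token hs] at *
    simp only [hin, if_true, if_pos hs]
    cases hstep : PySem.Int.ofChars? (token.drop ((PySem.Chars.find token ['/']).toNat + 1)) with
    | none => simp [intOrNone, hstep]
    | some step =>
      simp only [intOrNone, hstep, Option.bind_some]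
      by_cases h1 : step < 1
      · simp [h1]
      · simp only [h1, if_false]
        set tk := if token.take (PySem.Chars.find token ['/']).toNat = [] then ['*']
                  else token.take (PySem.Chars.find token ['/']).toNat with htk
        simp only [Option.bind_some]
        by_cases hstar : tk = ['*']
        · simp [hstar]
        · simp only [hstar, if_false]
          by_cases hd : 0 ≤ PySem.Chars.find tk ['-']
          · have hdin : PySem.Chars.isIn ['-'] tk = true := (isIn_iff_find_nonneg _ _).mpr hd
            rw [partition_eq_slices '-' tk hd] at *
            simp only [hdin, if_true, if_pos hd]
            cases ha : PySem.Int.ofChars? (tk.take (PySem.Chars.find tk ['-']).toNat) with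
            | none => simp
            | some a =>
              cases hb : PySem.Int.ofChars? (tk.drop ((PySem.Chars.find tk ['-']).toNat + 1)) with
              | none => simp
              | some b => simp
          · have hdin : PySem.Chars.isIn ['-'] tk = false := by
              rw [← Bool.not_eq_true]; rw [isIn_iff_find_nonneg]; exact hd
            simp only [hdin, Bool.false_eq_true, if_false, if_neg hd]
            cases hn : PySem.Int.ofChars? tk with
            | none => simp
            | some n => simp
  · have hin : PySem.Chars.isIn ['/'] token = false := by
      rw [← Bool.not_eq_true]; rw [isIn_iff_find_nonneg]; exact hs
    simp only [hin, Bool.false_eq_true, if_false, if_neg hs, Option.bind_some]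
    by_cases hstar : token = ['*']
    · simp [hstar]
    · simp only [hstar, if_false]
      by_cases hd : 0 ≤ PySem.Chars.find token ['-']
      · have hdin : PySem.Chars.isIn ['-'] token = true := (isIn_iff_find_nonneg _ _).mpr hd
        rw [partition_eq_slices '-' token hd] at *
        simp only [hdin, if_true, if_pos hd]
        cases ha : PySem.Int.ofChars? (token.take (PySem.Chars.find token ['-']).toNat) with
        | none => simp [intOrNone, ha]
        | some a =>
          cases hb : PySem.Int.ofChars? (token.drop ((PySem.Chars.find token ['-']).toNat + 1)) with
          | none => simp [intOrNone, ha, hb]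
          | some b => simp [intOrNone, ha, hb]
      · have hdin : PySem.Chars.isIn ['-'] token = false := by
          rw [← Bool.not_eq_true]; rw [isIn_iff_find_nonneg]; exact hd
        simp only [hdin, Bool.false_eq_true, if_false, if_neg hd, intOrNone]
        cases hn : PySem.Int.ofChars? token with
        | none => simp
        | some n => simp

theorem exists_match_iff (start stop step lo hi : Int) (hstep : 1 ≤ step) :
    (∃ v, (lo ≤ v ∧ v < hi + 1) ∧ start ≤ v ∧ v ≤ stop ∧ PySem.Int.mod (v - start) step = 0)
      ↔ max lo start + PySem.Int.mod (start - max lo start) step ≤ min hi stop := by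
  have hstep0 : step ≠ 0 := by omega
  set L := max lo start with hL
  set m := PySem.Int.mod (start - L) step with hm
  have hm0 : 0 ≤ m := PySem.Int.mod_nonneg _ (by omega)
  have hms : m < step := PySem.Int.mod_lt _ (by omega)
  have hdvd : step ∣ (start - L) - m := by
    have h := PySem.Int.floordiv_mul_add_mod (start - L) step
    exact ⟨PySem.Int.floordiv (start - L) step, by linarith⟩
  constructor
  · rintro ⟨v, ⟨hv1, hv2⟩, hv3, hv4, hv5⟩
    have hdv : step ∣ (v - start) := (PySem.Int.mod_eq_zero_iff_dvd _ _).mp hv5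
    have hvL : L ≤ v := max_le hv1 hv3
    have hd2 : step ∣ (v - (L + m)) := by
      have h2 := dvd_add hdv hdvd
      have h3 : v - start + (start - L - m) = v - (L + m) := by ring
      rwa [h3] at h2
    obtain ⟨k, hk⟩ := hd2
    have hk0 : 0 ≤ k := by nlinarith
    have : L + m ≤ v := by nlinarith
    omega
  · intro h
    refine ⟨L + m, ⟨by omega, by omega⟩, by omega, by omega, ?_⟩
    rw [PySem.Int.mod_eq_zero_iff_dvd]
    have h3 : L + m - start = -((start - L) - m) := by ring
    rw [h3]
    exact dvd_neg.mpr hdvd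

-- mem-relative congruence for List.any (Mathlib's List.any_congr is not mem-relative)
theorem any_congr_mem {α : Type} (l : List α) (p q : α → Bool) (h : ∀ x ∈ l, p x = q x) :
    l.any p = l.any q := by
  induction l with
  | nil => rfl
  | cons x xs ih =>
    simp only [List.any_cons, h x (List.mem_cons_self ..),
      ih fun y hy => h y (List.mem_cons_of_mem _ hy)]

theorem any_tokens (lo hi : Int) (hlohi : lo ≤ hi) (ts : List (List Char)) :
    (PySem.List.pyRange lo (hi + 1) 1).any (fun v => cronTokensMatch v lo hi ts) = satTokensB lo hi ts := by
  induction ts with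
  | nil => simp [cronTokensMatch, satTokensB]
  | cons t ts ih =>
    simp only [cronTokensMatch_cons]
    rw [show satTokensB lo hi (t :: ts) =
      (let token := PySem.Chars.strip t
       if token = [] then satTokensB lo hi ts
       else
         match token_ok token lo hi with
         | none => false
         | some true => true
         | some false => satTokensB lo hi ts) from rfl]
    by_cases h0 : PySem.Chars.strip t = []
    · simpa [h0] using ih
    · simp only [h0, if_false, token_ok_eq_parseA]
      cases hp : parseA (PySem.Chars.strip t) lo hi with
      | none => simp
      | some r =>
        obtain ⟨start, stop, step⟩ := r
        have hstep := parseA_step_pos _ lo hi _ _ _ hp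
        have hm0 : 0 ≤ PySem.Int.mod (start - max lo start) step := PySem.Int.mod_nonneg _ (by omega)
        simp only [Option.map_some]
        by_cases hf : max lo start + PySem.Int.mod (start - max lo start) step ≤ min hi stop
        · simp only [hf, decide_true]
          by_cases hskip : start > stop ∨ stop < lo ∨ start > hi
          · exact absurd hf (by omega)
          · simp only [if_neg hskip]
            obtain ⟨v, hv, hc⟩ := (exists_match_iff start stop step lo hi hstep).mpr hf
            refine List.any_eq_true.mpr ⟨v, (PySem.List.mem_pyRange_one).mpr ⟨hv.1, hv.2⟩, ?_⟩
            simp [hc]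
        · simp only [hf, decide_false]
          by_cases hskip : start > stop ∨ stop < lo ∨ start > hi
          · simp only [if_pos hskip]; exact ih
          · simp only [if_neg hskip]
            rw [← ih]
            apply any_congr_mem
            intro v hv
            rw [if_neg]
            intro hc
            obtain ⟨hv1, hv2⟩ := (PySem.List.mem_pyRange_one).mp hv
            exact hf ((exists_match_iff start stop step lo hi hstep).mp ⟨v, ⟨hv1, hv2⟩, hc⟩)

theorem field_eq (field : List Char) (lo hi : Int) (hlohi : lo ≤ hi) :
    (PySem.List.pyRange lo (hi + 1) 1).any (fun v => cron_field_matches field v lo hi)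
      = satTokensB lo hi (PySem.Chars.splitOn (PySem.Chars.strip field) [',']) := by
  unfold cron_field_matches
  exact any_tokens lo hi hlohi _

theorem checkFields_eq (p1 p2 p3 p4 p5 : List Char) :
    checkFieldsA ([p1, p2, p3, p4, p5].zip (pvBounds.zip pvLabels))
      = checkFieldsB (cronFieldsB.zip [p1, p2, p3, p4, p5]) := by
  simp only [pvBounds, pvLabels, cronFieldsB, List.zip_cons_cons, List.zip_nil_right,
    checkFieldsA, checkFieldsB, pvInvalidMsg,
    field_eq p1 0 59 (by norm_num), field_eq p2 0 23 (by norm_num),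
    field_eq p3 1 31 (by norm_num), field_eq p4 1 12 (by norm_num),
    field_eq p5 0 7 (by norm_num)]

-- ===== VERDICT (by name: the statement is the Claim_ definition above) =====
theorem validate_cron_expr_spec : Claim_equal_validate_cron_expr := by
  intro expr _
  show validate_cron_expr expr = validate_cron_expr_alt expr
  unfold validate_cron_expr validate_cron_expr_alt
  by_cases h1 : expr.toList = [] ∨ PySem.Chars.strip expr.toList = []
  · rw [if_pos h1, if_pos h1]
  · by_cases h2 : (PySem.Chars.split₀ (PySem.Chars.strip expr.toList)).length = 5
    · have h2' : ¬((PySem.Chars.split₀ (PySem.Chars.strip expr.toList)).length ≠ 5) := fun hx => hx h2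
      simp only [if_neg h1, if_neg h2']
      obtain ⟨p1, p2, p3, p4, p5, hps⟩ :
          ∃ a b c d e, PySem.Chars.split₀ (PySem.Chars.strip expr.toList) = [a, b, c, d, e] := by
        match hl : PySem.Chars.split₀ (PySem.Chars.strip expr.toList), h2 with
        | [a, b, c, d, e], _ => exact ⟨a, b, c, d, e, rfl⟩
      rw [hps]
      exact checkFields_eq p1 p2 p3 p4 p5
    · simp only [if_neg h1, if_pos h2]
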